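-- pv_equiv track=rewrite | github.com/lschachter/AdventOfCode | Day_07/determineStepOrder.py | mapStartingIndex
-- ===== SOURCE A (Python) =====
-- def mapStartingIndex(steps, sorter):
-- 	startingIndeces = {steps[0][sorter]: 0}
-- 	pointer = 0
-- 	for i in range(1, len(steps)):
-- 		step = steps[i][sorter]
-- 		if step in startingIndeces:
-- 			pointer += 1
-- 		else:
-- 			startingIndeces[step] = i
--
-- 	return startingIndeces
-- ===== SOURCE B (Python) =====
-- def mapStartingIndex(steps, sorter):
--     keys = [step[sorter] for step in steps]
--     first = {}
--     for i, k in reversed(list(enumerate(keys))):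
--         first[k] = i
--     return {k: first[k] for k in dict.fromkeys(keys)}
-- ===== Notes on version B (the rewrite author's own statement) =====
-- stated objective: alternative
-- what changed: B replaces A's forward loop with a membership test (and dead pointer counter) by a branch-free reverse-overwrite pass that leaves each key its first index, followed by an ordered dedup (dict.fromkeys) to rebuild A's first-occurrence insertion order.
import Mathlib
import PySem

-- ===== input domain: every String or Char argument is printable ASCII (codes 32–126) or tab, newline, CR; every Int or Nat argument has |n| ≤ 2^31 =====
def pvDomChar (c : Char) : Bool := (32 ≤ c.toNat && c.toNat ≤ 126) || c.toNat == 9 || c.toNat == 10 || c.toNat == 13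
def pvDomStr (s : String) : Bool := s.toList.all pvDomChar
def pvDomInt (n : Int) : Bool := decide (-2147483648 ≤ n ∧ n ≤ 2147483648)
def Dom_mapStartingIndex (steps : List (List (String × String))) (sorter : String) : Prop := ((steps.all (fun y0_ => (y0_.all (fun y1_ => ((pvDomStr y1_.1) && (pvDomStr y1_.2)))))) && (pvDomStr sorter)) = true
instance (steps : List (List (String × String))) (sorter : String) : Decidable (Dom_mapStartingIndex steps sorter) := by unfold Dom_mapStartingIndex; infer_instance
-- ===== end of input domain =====

-- B builds the first-occurrence map by a branch-free reverse overwrite pass plus an ordered dedup,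
-- instead of A's forward loop with a membership test (objective: alternative decomposition).

-- ===== PORT A =====
def mapStartingIndex (steps : List (List (String × String))) (sorter : String) : List (String × Int) :=
  -- startingIndeces = {steps[0][sorter]: 0}; pointer = 0
  let d0 : PySem.Dict String Int :=
    PySem.Dict.empty.insert (((PySem.Dict.mk (PySem.List.pyGetD steps 0 [])).get? sorter).getD "") 0
  -- for i in range(1, len(steps)): …
  let res :=
    (PySem.List.pyRange 1 (steps.length) 1).foldl
      (fun (st : PySem.Dict String Int × Int) i =>
        let step := ((PySem.Dict.mk (PySem.List.pyGetD steps i [])).get? sorter).getD ""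
        if st.1.contains step then (st.1, st.2 + 1) else (st.1.insert step i, st.2))
      (d0, 0)
  res.1.items

-- ===== PORT B =====
def mapStartingIndex_alt (steps : List (List (String × String))) (sorter : String) : List (String × Int) :=
  -- keys = [step[sorter] for step in steps]
  let keys := steps.map (fun step => ((PySem.Dict.mk step).get? sorter).getD "")
  -- first = {}; for i, k in reversed(list(enumerate(keys))): first[k] = i
  let first :=
    (PySem.List.enumerate keys 0).reverse.foldl
      (fun (d : PySem.Dict String Int) p => d.insert p.2 p.1) PySem.Dict.empty
  -- return {k: first[k] for k in dict.fromkeys(keys)}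
  (PySem.List.dedup keys).map (fun k => (k, first.getD k 0))

-- ===== PRECONDITION & SPEC =====
-- Pre_ excludes exactly the inputs on which A raises: empty steps (IndexError) and a step without the sorter key (KeyError).
def Pre_mapStartingIndex (steps : List (List (String × String))) (sorter : String) : Prop :=
  steps ≠ [] ∧ ∀ step ∈ steps, ((PySem.Dict.mk step).get? sorter).isSome = true
instance (steps : List (List (String × String))) (sorter : String) : Decidable (Pre_mapStartingIndex steps sorter) := by
  unfold Pre_mapStartingIndex; infer_instance

def pvWitness_mapStartingIndex : (List (List (String × String))) × String :=
  ([[("s", "x")], [("s", "y")], [("s", "x")]], "s")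

def Spec_mapStartingIndex (steps : List (List (String × String))) (sorter : String) (out : List (String × Int)) : Prop := out = mapStartingIndex_alt steps sorter
instance (steps : List (List (String × String))) (sorter : String) (out : List (String × Int)) : Decidable (Spec_mapStartingIndex steps sorter out) := by unfold Spec_mapStartingIndex; infer_instance

-- ===== CLAIM (what is proved, stated in full; the proofs are below) =====
def Claim_equal_mapStartingIndex : Prop := ∀ (steps : List (List (String × String))) (sorter : String), Dom_mapStartingIndex steps sorter → Pre_mapStartingIndex steps sorter → Spec_mapStartingIndex steps sorter (mapStartingIndex steps sorter)

-- ===== LEMMAS AND PROOFS =====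


-- step[sorter] as both ports compute it.
def pvKey (sorter : String) (step : List (String × String)) : String :=
  ((PySem.Dict.mk step).get? sorter).getD ""

-- The common normal form: first-occurrence keys in order, each with its first index.
def pvF (keys : List String) : List (String × Int) :=
  (PySem.List.dedup keys).map (fun k => (k, (((PySem.List.index? keys k).getD 0 : Nat) : Int)))

-- A's loop body on an (index, key) pair.
def pvStepA (st : PySem.Dict String Int × Int) (p : Int × String) : PySem.Dict String Int × Int :=
  if st.1.contains p.2 then (st.1, st.2 + 1) else (st.1.insert p.2 p.1, st.2)

theorem pv_contains_mkF (l : List String) (k : String) :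
    (PySem.Dict.mk (pvF l)).contains k = decide (k ∈ l) := by
  simp [pvF, PySem.Dict.contains_mk, List.any_map, Function.comp_def, List.any_beq']

theorem pv_F_append_mem (l : List String) (k : String) (hk : k ∈ l) :
    pvF (l ++ [k]) = pvF l := by
  unfold pvF
  have hd : PySem.List.dedup (l ++ [k]) = PySem.List.dedup l := by
    simp [PySem.Set.ofList_append_singleton, PySem.Set.add_of_mem, PySem.Set.mem_ofList, hk]
  rw [hd]
  refine List.map_congr_left (fun x hx => ?_)
  rw [PySem.List.index?_append_of_mem _ ((PySem.List.mem_dedup ..).mp hx)]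

theorem pv_F_append_not_mem (l : List String) (k : String) (hk : k ∉ l) :
    pvF (l ++ [k]) = pvF l ++ [(k, (l.length : Int))] := by
  unfold pvF
  have hd : PySem.List.dedup (l ++ [k]) = PySem.List.dedup l ++ [k] := by
    simp [PySem.Set.ofList_append_singleton, PySem.Set.add_of_not_mem, PySem.Set.mem_ofList, hk]
  rw [hd, List.map_append]
  congr 1
  · refine List.map_congr_left (fun x hx => ?_)
    rw [PySem.List.index?_append_of_mem _ ((PySem.List.mem_dedup ..).mp hx)]
  · simp only [List.map_cons, List.map_nil, PySem.List.index?_append_singleton_self _ _ hk]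
    simp

theorem pvA_main (l : List String) (hl : l ≠ []) :
    (((PySem.List.enumerate l 0).drop 1).foldl pvStepA
        (PySem.Dict.empty.insert (PySem.List.pyGetD l 0 "") 0, 0)).1 = PySem.Dict.mk (pvF l) := by
  induction l using List.reverseRecOn with
  | nil => exact absurd rfl hl
  | append_singleton l k ih =>
    rcases List.eq_nil_or_concat' l with rfl | hne
    · -- l = [], so the whole list is [k]
      apply PySem.Dict.ext
      simp [PySem.List.enumerate_cons, PySem.List.enumerate_nil, pvF,
            PySem.List.pyGetD, PySem.List.pyGet?, PySem.List.pyIdx?,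
            PySem.Set.ofList, PySem.Set.add, PySem.Dict.empty, PySem.Dict.insert,
            PySem.Dict.contains]
    · have hl' : l ≠ [] := by rintro rfl; obtain ⟨L, b, hLb⟩ := hne; simp at hLb
      have h0 : PySem.List.pyGetD (l ++ [k]) 0 "" = PySem.List.pyGetD l 0 "" := by
        rcases l with _ | ⟨x, xs⟩
        · exact absurd rfl hl'
        · have hpos : (0 : Int) ≤ (xs.length : Int) + 1 := by positivity
          simp [PySem.List.pyGetD, PySem.List.pyGet?, PySem.List.pyIdx?, hpos]
      have hen : PySem.List.enumerate (l ++ [k]) 0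
          = PySem.List.enumerate l 0 ++ [((l.length : Int), k)] := by
        rw [PySem.List.enumerate_append, PySem.List.enumerate_cons, PySem.List.enumerate_nil]
        norm_num
      have hlen : 1 ≤ (PySem.List.enumerate l 0).length := by
        simp [PySem.List.length_enumerate]
        exact List.length_pos_iff.mpr hl'
      rw [h0, hen, List.drop_append_of_le_length hlen, List.foldl_append, List.foldl_cons,
          List.foldl_nil]
      set st := ((PySem.List.enumerate l 0).drop 1).foldl pvStepA
          (PySem.Dict.empty.insert (PySem.List.pyGetD l 0 "") 0, 0) with hst
      have h1 : st.1 = PySem.Dict.mk (pvF l) := ih hl'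
      unfold pvStepA
      rw [h1, pv_contains_mkF]
      by_cases hk : k ∈ l
      · simp only [hk, decide_true, if_true]
        rw [pv_F_append_mem l k hk]
      · simp only [hk, decide_false, Bool.false_eq_true, if_false]
        apply PySem.Dict.ext
        have hc : (PySem.Dict.mk (pvF l)).contains k = false := by
          rw [pv_contains_mkF]; simp [hk]
        rw [PySem.Dict.items_insert_of_not_contains _ _ hc, pv_F_append_not_mem l k hk]

theorem pv_foldl_insert_get? (ps : List (Int × String)) (d : PySem.Dict String Int) (k : String) :
    (ps.foldl (fun d p => d.insert p.2 p.1) d).get? k =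
      ((ps.reverse.find? (fun p => p.2 == k)).map (·.1)).or (d.get? k) := by
  induction ps generalizing d with
  | nil => simp
  | cons p rest ih =>
    have hins : (d.insert p.2 p.1).get? k = if p.2 == k then some p.1 else d.get? k := by
      rw [PySem.Dict.get?_insert]
      by_cases h : p.2 = k
      · simp [h]
      · simp [h, Ne.symm h]
    rw [List.foldl_cons, ih, List.reverse_cons, List.find?_append, hins]
    rcases hfind : rest.reverse.find? (fun p => p.2 == k) with _ | q
    · rcases hpk : (p.2 == k) with _ | _
      · simp [hfind, (by simpa using hpk : ¬ p.2 = k)]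
      · simp [hfind, (by simpa using hpk : p.2 = k)]
    · simp [hfind]

theorem pv_enumerate_find (keys : List String) (k : String) (s : Int) :
    ((PySem.List.enumerate keys s).find? (fun p => p.2 == k)).map (·.1)
      = (PySem.List.index? keys k).map (fun m => s + (m : Int)) := by
  induction keys generalizing s with
  | nil => simp [PySem.List.enumerate_nil]
  | cons x xs ih =>
    rw [PySem.List.enumerate_cons, List.find?_cons]
    rcases hxk : (x == k) with _ | _
    · rw [PySem.List.index?_cons_of_ne _ (by simpa using hxk)]
      rw [ih]
      rcases PySem.List.index? xs k with _ | m
      · simp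
      · simp
        ring
    · have hx : x = k := by simpa using hxk
      subst hx
      rw [PySem.List.index?_cons_self]
      simp

theorem pvB_main (keys : List String) :
    (PySem.List.dedup keys).map (fun k =>
        (k, ((PySem.List.enumerate keys 0).reverse.foldl
          (fun (d : PySem.Dict String Int) p => d.insert p.2 p.1) PySem.Dict.empty).getD k 0))
      = pvF keys := by
  unfold pvF
  refine List.map_congr_left (fun k hk => ?_)
  have hkmem : k ∈ keys := (PySem.List.mem_dedup ..).mp hk
  obtain ⟨m, hm⟩ : ∃ m, PySem.List.index? keys k = some m := by
    rcases hidx : PySem.List.index? keys k with _ | m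
    · exact absurd hkmem ((PySem.List.index?_eq_none_iff ..).mp hidx)
    · exact ⟨m, rfl⟩
  have hget : ((PySem.List.enumerate keys 0).reverse.foldl
      (fun (d : PySem.Dict String Int) p => d.insert p.2 p.1) PySem.Dict.empty).get? k
      = some (m : Int) := by
    rw [pv_foldl_insert_get?, List.reverse_reverse]
    have h2 := pv_enumerate_find keys k 0
    rw [hm] at h2
    rcases hfind : (PySem.List.enumerate keys 0).find? (fun p => p.2 == k) with _ | q
    · rw [hfind] at h2; simp at h2
    · rw [hfind] at h2
      simp at h2
      rw [hfind]
      simp [h2]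
  congr 1
  rw [PySem.Dict.getD_eq_get?_getD, hget, hm]
  rfl

theorem pvA_eq (steps : List (List (String × String))) (sorter : String)
    (h : Pre_mapStartingIndex steps sorter) :
    mapStartingIndex steps sorter
      = pvF (steps.map (fun step => ((PySem.Dict.mk step).get? sorter).getD "")) := by
  obtain ⟨hne, -⟩ := h
  have hkne : steps.map (pvKey sorter) ≠ [] := by simpa using hne
  have hklen : (0 : Int) < ((steps.map (pvKey sorter)).length : Int) := by
    have := List.length_pos_iff.mpr hkne
    exact_mod_cast this
  have hkey : ∀ i : Int, pvKey sorter (PySem.List.pyGetD steps i [])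
      = PySem.List.pyGetD (steps.map (pvKey sorter)) i "" := by
    intro i
    have h1 : PySem.List.pyGetD (steps.map (pvKey sorter)) i (pvKey sorter [])
        = pvKey sorter (PySem.List.pyGetD steps i []) := PySem.List.pyGetD_map ..
    rw [show pvKey sorter [] = "" from rfl] at h1
    exact h1.symm
  have henum : (PySem.List.enumerate (steps.map (pvKey sorter)) 0).drop 1
      = (PySem.List.pyRange 1 ((steps.map (pvKey sorter)).length) 1).map
          (fun j => (j, PySem.List.pyGetD (steps.map (pvKey sorter)) j "")) := by
    rw [PySem.List.enumerate_eq_map_pyRange (d := "")]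
    simp only [PySem.List.len_eq]
    rw [PySem.List.pyRange_one_cons hklen, List.map_cons]
    simp
  show ((PySem.List.pyRange 1 (steps.length) 1).foldl
      (fun st i => pvStepA st (i, pvKey sorter (PySem.List.pyGetD steps i [])))
      (PySem.Dict.empty.insert (pvKey sorter (PySem.List.pyGetD steps 0 [])) 0, 0)).1.items
    = pvF (steps.map (pvKey sorter))
  simp only [hkey]
  rw [show ((steps.length : Int)) = (((steps.map (pvKey sorter)).length : Int)) by simp]
  rw [← List.foldl_map, ← henum, pvA_main _ hkne]

theorem pvB_eq (steps : List (List (String × String))) (sorter : String) :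
    mapStartingIndex_alt steps sorter
      = pvF (steps.map (fun step => ((PySem.Dict.mk step).get? sorter).getD "")) := by
  unfold mapStartingIndex_alt
  exact pvB_main _

-- ===== VERDICT (by name: the statement is the Claim_ definition above) =====
theorem mapStartingIndex_spec : Claim_equal_mapStartingIndex := by
  intro steps sorter _hd hpre
  unfold Spec_mapStartingIndex
  rw [pvA_eq steps sorter hpre, pvB_eq]
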